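-- pv_equiv track=rewrite | github.com/MarceauSolutions/dev-sandbox | projects/lead-generation/src/segment_prospects.py | get_recommended_template
-- ===== SOURCE A (Python) =====
-- def get_recommended_template(segment: str, company_name: str) -> str:
--     """
--     Return the best cold_outreach.py template key for this segment.
--
--     Priority: company-name-specific signals override segment-level assignment.
--     These templates map directly to the AI missed-call offer.
--     """
--     cn = (company_name or "").lower()
--
--     # Company-name-specific overrides (most specific, highest confidence)
--     if any(kw in cn for kw in ["hvac", "air conditioning", "cooling", "heating", "comfort control", "climate"]):
--         return "hvac_missed_call"
--     if any(kw in cn for kw in ["pool", "spa service"]):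
--         return "pool_missed_call"
--     if any(kw in cn for kw in ["electric", "electrical"]):
--         return "electrical_missed_call"
--     if any(kw in cn for kw in ["roof", "reroof"]):
--         return "roofing_missed_call"
--     if any(kw in cn for kw in ["plumb", "drain", "sewer"]):
--         return "hvac_missed_call"  # same emergency-call hook applies
--     if any(kw in cn for kw in ["repair", "handyman", "paint", "cleaning", "maid",
--                                 "lawn", "landscape", "irrigation", "moving", "movers"]):
--         return "contractor_missed_call"
--
--     # Segment-level fallback
--     segment_template_map = {
--         "HVAC / Air Conditioning": "hvac_missed_call",
--         "Plumbing": "hvac_missed_call",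
--         "Electrical": "electrical_missed_call",
--         "Roofing": "roofing_missed_call",
--         "Landscaping / Lawn": "service_automation",
--         "Pest Control": "service_automation",
--         "Dental / Medical / Healthcare": "wellness_automation",
--         "Legal": "discovery_question",
--         "Property Management / Real Estate": "discovery_question",
--         "Smart Home / Technology": "discovery_question",
--         "Other": "contractor_missed_call",
--     }
--     return segment_template_map.get(segment, "discovery_question")
-- ===== SOURCE B (Python) =====
-- # B: exhaustive min-priority scan over a flat keyword->(priority, template) table,
-- # instead of A's ordered short-circuit cascade of keyword groups.
-- _KEYWORD_RULES = {
--     "hvac": (0, "hvac_missed_call"),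
--     "air conditioning": (0, "hvac_missed_call"),
--     "cooling": (0, "hvac_missed_call"),
--     "heating": (0, "hvac_missed_call"),
--     "comfort control": (0, "hvac_missed_call"),
--     "climate": (0, "hvac_missed_call"),
--     "pool": (1, "pool_missed_call"),
--     "spa service": (1, "pool_missed_call"),
--     "electric": (2, "electrical_missed_call"),
--     "electrical": (2, "electrical_missed_call"),
--     "roof": (3, "roofing_missed_call"),
--     "reroof": (3, "roofing_missed_call"),
--     "plumb": (4, "hvac_missed_call"),
--     "drain": (4, "hvac_missed_call"),
--     "sewer": (4, "hvac_missed_call"),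
--     "repair": (5, "contractor_missed_call"),
--     "handyman": (5, "contractor_missed_call"),
--     "paint": (5, "contractor_missed_call"),
--     "cleaning": (5, "contractor_missed_call"),
--     "maid": (5, "contractor_missed_call"),
--     "lawn": (5, "contractor_missed_call"),
--     "landscape": (5, "contractor_missed_call"),
--     "irrigation": (5, "contractor_missed_call"),
--     "moving": (5, "contractor_missed_call"),
--     "movers": (5, "contractor_missed_call"),
-- }
--
-- _SEGMENT_TEMPLATE_MAP = {
--     "HVAC / Air Conditioning": "hvac_missed_call",
--     "Plumbing": "hvac_missed_call",
--     "Electrical": "electrical_missed_call",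
--     "Roofing": "roofing_missed_call",
--     "Landscaping / Lawn": "service_automation",
--     "Pest Control": "service_automation",
--     "Dental / Medical / Healthcare": "wellness_automation",
--     "Legal": "discovery_question",
--     "Property Management / Real Estate": "discovery_question",
--     "Smart Home / Technology": "discovery_question",
--     "Other": "contractor_missed_call",
-- }
--
--
-- def get_recommended_template(segment: str, company_name: str) -> str:
--     cn = (company_name or "").lower()
--     best = None
--     for kw, pt in _KEYWORD_RULES.items():
--         if kw in cn and (best is None or pt[0] < best[0]):
--             best = pt
--     if best is not None:
--         return best[1]
--     return _SEGMENT_TEMPLATE_MAP.get(segment, "discovery_question")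
-- ===== Notes on version B (the rewrite author's own statement) =====
-- stated objective: alternative
-- what changed: Replaces A's ordered short-circuit cascade of six keyword groups with one exhaustive pass over a flat keyword->(priority, template) map keeping the minimum-priority match in an accumulator, then the same segment fallback.
import Mathlib
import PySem

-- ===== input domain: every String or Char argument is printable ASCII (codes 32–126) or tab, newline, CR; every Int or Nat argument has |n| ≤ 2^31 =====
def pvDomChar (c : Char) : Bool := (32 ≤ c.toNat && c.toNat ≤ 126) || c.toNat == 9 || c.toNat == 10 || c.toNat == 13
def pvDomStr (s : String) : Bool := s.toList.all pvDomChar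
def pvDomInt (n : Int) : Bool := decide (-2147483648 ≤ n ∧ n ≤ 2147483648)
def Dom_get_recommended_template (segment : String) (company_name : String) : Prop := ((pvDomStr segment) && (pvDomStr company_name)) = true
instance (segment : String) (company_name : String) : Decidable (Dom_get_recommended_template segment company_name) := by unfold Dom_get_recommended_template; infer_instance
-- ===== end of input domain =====

-- B replaces A's ordered short-circuit keyword-group cascade with one exhaustive pass over a
-- flat keyword->(priority, template) map keeping the minimum-priority match (objective: alternative).

-- ===== PORT A =====
def pvSegMap : PySem.Dict String String := PySem.Dict.ofList [
  ("HVAC / Air Conditioning", "hvac_missed_call"),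
  ("Plumbing", "hvac_missed_call"),
  ("Electrical", "electrical_missed_call"),
  ("Roofing", "roofing_missed_call"),
  ("Landscaping / Lawn", "service_automation"),
  ("Pest Control", "service_automation"),
  ("Dental / Medical / Healthcare", "wellness_automation"),
  ("Legal", "discovery_question"),
  ("Property Management / Real Estate", "discovery_question"),
  ("Smart Home / Technology", "discovery_question"),
  ("Other", "contractor_missed_call")]

def get_recommended_template (segment : String) (company_name : String) : String :=
  let cn := PySem.Str.lower (if company_name = "" then "" else company_name)
  if ["hvac", "air conditioning", "cooling", "heating", "comfort control", "climate"].any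
      (fun kw => PySem.Str.isIn kw cn) then "hvac_missed_call"
  else if ["pool", "spa service"].any (fun kw => PySem.Str.isIn kw cn) then "pool_missed_call"
  else if ["electric", "electrical"].any (fun kw => PySem.Str.isIn kw cn) then "electrical_missed_call"
  else if ["roof", "reroof"].any (fun kw => PySem.Str.isIn kw cn) then "roofing_missed_call"
  else if ["plumb", "drain", "sewer"].any (fun kw => PySem.Str.isIn kw cn) then "hvac_missed_call"
  else if ["repair", "handyman", "paint", "cleaning", "maid",
           "lawn", "landscape", "irrigation", "moving", "movers"].any
      (fun kw => PySem.Str.isIn kw cn) then "contractor_missed_call"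
  else pvSegMap.getD segment "discovery_question"

-- ===== PORT B =====
-- flat dict _KEYWORD_RULES in its insertion order (keys distinct)
def pvKwRules : List (String × Nat × String) := [
  ("hvac", 0, "hvac_missed_call"),
  ("air conditioning", 0, "hvac_missed_call"),
  ("cooling", 0, "hvac_missed_call"),
  ("heating", 0, "hvac_missed_call"),
  ("comfort control", 0, "hvac_missed_call"),
  ("climate", 0, "hvac_missed_call"),
  ("pool", 1, "pool_missed_call"),
  ("spa service", 1, "pool_missed_call"),
  ("electric", 2, "electrical_missed_call"),
  ("electrical", 2, "electrical_missed_call"),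
  ("roof", 3, "roofing_missed_call"),
  ("reroof", 3, "roofing_missed_call"),
  ("plumb", 4, "hvac_missed_call"),
  ("drain", 4, "hvac_missed_call"),
  ("sewer", 4, "hvac_missed_call"),
  ("repair", 5, "contractor_missed_call"),
  ("handyman", 5, "contractor_missed_call"),
  ("paint", 5, "contractor_missed_call"),
  ("cleaning", 5, "contractor_missed_call"),
  ("maid", 5, "contractor_missed_call"),
  ("lawn", 5, "contractor_missed_call"),
  ("landscape", 5, "contractor_missed_call"),
  ("irrigation", 5, "contractor_missed_call"),
  ("moving", 5, "contractor_missed_call"),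
  ("movers", 5, "contractor_missed_call")]

-- one loop iteration: 'if kw in cn and (best is None or pt[0] < best[0]): best = pt'
def pvStep (cn : String) (best : Option (Nat × String)) (e : String × Nat × String) : Option (Nat × String) :=
  if PySem.Str.isIn e.1 cn &&
      (match best with | none => true | some (p, _) => decide (e.2.1 < p)) then
    some e.2
  else best

def get_recommended_template_alt (segment : String) (company_name : String) : String :=
  let cn := PySem.Str.lower (if company_name = "" then "" else company_name)
  let best := pvKwRules.foldl (pvStep cn) none
  match best with
  | some (_, tpl) => tpl
  | none => pvSegMap.getD segment "discovery_question"

-- ===== PRECONDITION & SPEC =====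
def Spec_get_recommended_template (segment : String) (company_name : String) (out : String) : Prop := out = get_recommended_template_alt segment company_name
instance (segment : String) (company_name : String) (out : String) : Decidable (Spec_get_recommended_template segment company_name out) := by unfold Spec_get_recommended_template; infer_instance

-- ===== CLAIM (what is proved, stated in full; the proofs are below) =====
def Claim_equal_get_recommended_template : Prop := ∀ (segment : String) (company_name : String), Dom_get_recommended_template segment company_name → Spec_get_recommended_template segment company_name (get_recommended_template segment company_name)

-- ===== LEMMAS AND PROOFS =====

-- A's cascade viewed as groups, for the correspondence proof only
def pvGroups : List (List String × String) := [
  (["hvac", "air conditioning", "cooling", "heating", "comfort control", "climate"], "hvac_missed_call"),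
  (["pool", "spa service"], "pool_missed_call"),
  (["electric", "electrical"], "electrical_missed_call"),
  (["roof", "reroof"], "roofing_missed_call"),
  (["plumb", "drain", "sewer"], "hvac_missed_call"),
  (["repair", "handyman", "paint", "cleaning", "maid",
    "lawn", "landscape", "irrigation", "moving", "movers"], "contractor_missed_call")]

def pvFlatFrom (i : Nat) : List (List String × String) → List (String × Nat × String)
  | [] => []
  | (kws, tpl) :: rest => kws.map (fun kw => (kw, i, tpl)) ++ pvFlatFrom (i + 1) rest

theorem pvFlat_eq : pvKwRules = pvFlatFrom 0 pvGroups := by rfl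

theorem pvFoldGroup_keep (cn : String) (i : Nat) (tpl : String) (p : Nat) (t : String)
    (h : p ≤ i) : ∀ kws : List String,
    (kws.map (fun kw => (kw, i, tpl))).foldl (pvStep cn) (some (p, t)) = some (p, t) := by
  intro kws
  induction kws with
  | nil => rfl
  | cons k ks ih =>
      simp only [List.map, List.foldl, pvStep]
      have : ¬ (i < p) := by omega
      simp [this, ih]

theorem pvFoldFlat_keep (cn : String) (p : Nat) (t : String) :
    ∀ (gs : List (List String × String)) (i : Nat), p ≤ i →
    (pvFlatFrom i gs).foldl (pvStep cn) (some (p, t)) = some (p, t) := by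
  intro gs
  induction gs with
  | nil => intro i _; rfl
  | cons g rest ih =>
      intro i h
      obtain ⟨kws, tpl⟩ := g
      simp only [pvFlatFrom, List.foldl_append, pvFoldGroup_keep cn i tpl p t h kws]
      exact ih (i + 1) (by omega)

theorem pvFoldGroup_none (cn : String) (i : Nat) (tpl : String) :
    ∀ kws : List String,
    (kws.map (fun kw => (kw, i, tpl))).foldl (pvStep cn) none =
      (if kws.any (fun kw => PySem.Str.isIn kw cn) then some (i, tpl) else none) := by
  intro kws
  induction kws with
  | nil => rfl
  | cons k ks ih =>
      simp only [List.map, List.foldl, List.any_cons, pvStep, Bool.and_true]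
      by_cases hk : PySem.Str.isIn k cn = true
      · simp only [hk, Bool.true_or, reduceIte]
        exact pvFoldGroup_keep cn i tpl i tpl (le_refl i) ks
      · have hk' : PySem.Str.isIn k cn = false := by
          cases hkk : PySem.Str.isIn k cn
          · rfl
          · exact absurd hkk hk
        simp only [hk', Bool.false_or, Bool.false_eq_true, reduceIte]
        exact ih

theorem pvFoldFlat_none (cn : String) :
    ∀ (gs : List (List String × String)) (i : Nat),
    ((pvFlatFrom i gs).foldl (pvStep cn) none).map (·.2) =
      (gs.find? (fun r => r.1.any (fun kw => PySem.Str.isIn kw cn))).map (·.2) := by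
  intro gs
  induction gs with
  | nil => intro i; rfl
  | cons g rest ih =>
      intro i
      obtain ⟨kws, tpl⟩ := g
      simp only [pvFlatFrom, List.foldl_append, pvFoldGroup_none cn i tpl kws, List.find?]
      cases h : kws.any (fun kw => PySem.Str.isIn kw cn) with
      | true =>
          simp only [reduceIte]
          rw [pvFoldFlat_keep cn i tpl rest (i + 1) (by omega)]
          rfl
      | false =>
          simp only [Bool.false_eq_true, reduceIte]
          exact ih (i + 1)

-- ===== VERDICT (by name: the statement is the Claim_ definition above) =====
set_option maxHeartbeats 1000000 in
theorem get_recommended_template_spec : Claim_equal_get_recommended_template := by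
  intro segment company_name _
  simp only [Spec_get_recommended_template, get_recommended_template,
    get_recommended_template_alt, pvFlat_eq]
  generalize PySem.Str.lower (if company_name = "" then "" else company_name) = cn
  have h := pvFoldFlat_none cn pvGroups 0
  cases hb : List.foldl (pvStep cn) none (pvFlatFrom 0 pvGroups) with
  | none =>
      rw [hb] at h
      simp only [pvGroups, List.find?, Option.map] at h
      cases b1 : (["hvac", "air conditioning", "cooling", "heating", "comfort control", "climate"] : List String).any (fun kw => PySem.Str.isIn kw cn) <;>
      cases b2 : (["pool", "spa service"] : List String).any (fun kw => PySem.Str.isIn kw cn) <;>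
      cases b3 : (["electric", "electrical"] : List String).any (fun kw => PySem.Str.isIn kw cn) <;>
      cases b4 : (["roof", "reroof"] : List String).any (fun kw => PySem.Str.isIn kw cn) <;>
      cases b5 : (["plumb", "drain", "sewer"] : List String).any (fun kw => PySem.Str.isIn kw cn) <;>
      cases b6 : (["repair", "handyman", "paint", "cleaning", "maid",
          "lawn", "landscape", "irrigation", "moving", "movers"] : List String).any (fun kw => PySem.Str.isIn kw cn) <;>
      simp only [b1, b2, b3, b4, b5, b6, Bool.false_eq_true, reduceIte] at h ⊢ <;>
      first
        | rfl
        | (injection h with h2; exact h2.symm)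
        | injection h
  | some pt =>
      obtain ⟨p, t⟩ := pt
      rw [hb] at h
      simp only [pvGroups, List.find?, Option.map] at h
      cases b1 : (["hvac", "air conditioning", "cooling", "heating", "comfort control", "climate"] : List String).any (fun kw => PySem.Str.isIn kw cn) <;>
      cases b2 : (["pool", "spa service"] : List String).any (fun kw => PySem.Str.isIn kw cn) <;>
      cases b3 : (["electric", "electrical"] : List String).any (fun kw => PySem.Str.isIn kw cn) <;>
      cases b4 : (["roof", "reroof"] : List String).any (fun kw => PySem.Str.isIn kw cn) <;>
      cases b5 : (["plumb", "drain", "sewer"] : List String).any (fun kw => PySem.Str.isIn kw cn) <;>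
      cases b6 : (["repair", "handyman", "paint", "cleaning", "maid",
          "lawn", "landscape", "irrigation", "moving", "movers"] : List String).any (fun kw => PySem.Str.isIn kw cn) <;>
      simp only [b1, b2, b3, b4, b5, b6, Bool.false_eq_true, reduceIte] at h ⊢ <;>
      first
        | rfl
        | (injection h with h2; exact h2.symm)
        | injection h
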